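-- pv_equiv track=rewrite | github.com/AlejandroHernandez996/WikiGuess | WikiGuess.py | removeTitleFromBody
-- ===== SOURCE A (Python) =====
-- def removeTitleFromBody(tList,b):
--     before = ''
--     after = ''
--     for i in range(len(b)):
--         for j in range(len(tList)):
--             if(tList[j] == b[i:i+len(tList[j])]):
--                 before = b[0:i]
--                 after = b[i+1+len(tList[j]):len(b)]
--                 return before + '_'*len(tList[j])+after
-- ===== SOURCE B (Python) =====
-- def removeTitleFromBody(tList, b):
--     best = None  # (position, index, title) of leftmost match, earliest title on ties
--     for j, t in enumerate(tList):
--         p = b.find(t)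
--         if p != -1 and (best is None or p < best[0]):
--             best = (p, j, t)
--     if best is None:
--         return None
--     p, _, t = best
--     return b[:p] + '_' * len(t) + b[p + 1 + len(t):]
-- ===== Notes on version B (the rewrite author's own statement) =====
-- stated objective: faster
-- what changed: A scans every body position and re-slices the body for every title at each position; B instead runs one find per title (a single substring search each), keeps the (position, title-index)-lexicographically smallest hit, and builds the result once from it.
-- outside the precondition, e.g. on removeTitleFromBody([''], ''): A returns None, B returns ''
import Mathlib
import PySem

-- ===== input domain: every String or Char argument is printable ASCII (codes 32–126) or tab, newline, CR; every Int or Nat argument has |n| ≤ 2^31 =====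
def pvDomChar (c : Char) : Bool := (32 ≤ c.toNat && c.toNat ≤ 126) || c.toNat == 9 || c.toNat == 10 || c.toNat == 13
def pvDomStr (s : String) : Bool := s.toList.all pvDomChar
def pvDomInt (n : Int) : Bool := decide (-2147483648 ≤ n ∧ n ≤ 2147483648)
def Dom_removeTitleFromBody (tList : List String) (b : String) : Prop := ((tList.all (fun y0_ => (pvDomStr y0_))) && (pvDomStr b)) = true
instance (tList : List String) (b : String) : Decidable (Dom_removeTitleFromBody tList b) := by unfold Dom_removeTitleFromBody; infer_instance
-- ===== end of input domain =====

-- B replaces A's per-position, per-title slice comparison with one substring `find` per title,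
-- keeping the leftmost hit (earliest title on ties); measurably faster by constant factor, same results.


-- ===== PORT A =====
-- inner `for j in range(len(tList))` loop: first title matching at position i decides the result
def pvAinner (l : List Char) (i : Nat) : List String → Option String
  | [] => none
  | t :: ts =>
    if t.toList = PySem.List.slice l (some (i : Int)) (some ((i : Int) + (t.toList.length : Int))) then
      some (String.ofList (PySem.List.slice l (some (0 : Int)) (some (i : Int)) ++
        List.replicate t.toList.length '_' ++
        PySem.List.slice l (some ((i : Int) + 1 + (t.toList.length : Int))) (some (l.length : Int))))
    else pvAinner l i ts

-- outer `for i in range(len(b))` loop with early return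
def pvAgo (tList : List String) (l : List Char) : Nat → Nat → Option String
  | _, 0 => none
  | i, fuel + 1 =>
    match pvAinner l i tList with
    | some r => some r
    | none => pvAgo tList l (i + 1) fuel

def removeTitleFromBody (tList : List String) (b : String) : Option String :=
  pvAgo tList b.toList 0 b.toList.length

-- ===== PORT B =====
-- one fold step of Source B's loop: `if p != -1 and (best is None or p < best[0]): best = (p, j, t)`
def pvBstep (l : List Char) (best : Option (Int × Int × String)) (jt : Int × String) :
    Option (Int × Int × String) :=
  let p := PySem.Chars.find l jt.2.toList
  match best with
  | none => if p = -1 then none else some (p, jt.1, jt.2)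
  | some q => if p ≠ -1 ∧ p < q.1 then some (p, jt.1, jt.2) else some q

def removeTitleFromBody_alt (tList : List String) (b : String) : Option String :=
  match (PySem.List.enumerate tList 0).foldl (pvBstep b.toList) none with
  | none => none
  | some (p, _, t) =>
    some (String.ofList (PySem.List.slice b.toList none (some p) ++
      List.replicate t.toList.length '_' ++
      PySem.List.slice b.toList (some (p + 1 + (t.toList.length : Int))) none))

-- ===== PRECONDITION & SPEC =====
-- Pre_ excludes only the degenerate corner of an empty body together with an empty title: A's
-- position loop never runs on an empty body and returns None, while B's find sees the empty title
-- at position 0 and returns '' — both readings of this unspecified corner are defensible.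
def Pre_removeTitleFromBody (tList : List String) (b : String) : Prop :=
  ¬ (b = "" ∧ "" ∈ tList)
instance (tList : List String) (b : String) : Decidable (Pre_removeTitleFromBody tList b) := by
  unfold Pre_removeTitleFromBody; infer_instance
def pvWitness_removeTitleFromBody : List String × String := (["b"], "ab")

def Spec_removeTitleFromBody (tList : List String) (b : String) (out : Option String) : Prop := out = removeTitleFromBody_alt tList b
instance (tList : List String) (b : String) (out : Option String) : Decidable (Spec_removeTitleFromBody tList b out) := by unfold Spec_removeTitleFromBody; infer_instance

-- ===== CLAIM (what is proved, stated in full; the proofs are below) =====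
def Claim_equal_removeTitleFromBody : Prop := ∀ (tList : List String) (b : String), Dom_removeTitleFromBody tList b → Pre_removeTitleFromBody tList b → Spec_removeTitleFromBody tList b (removeTitleFromBody tList b)

-- ===== LEMMAS AND PROOFS =====

-- first occurrence of title t in l, as Source B computes it
def pvFnd (l : List Char) (t : String) : Int := PySem.Chars.find l t.toList

-- structural spec of B's fold: leftmost hit, earliest entry on ties
def pvPick (l : List Char) : List (Int × String) → Option (Int × Int × String)
  | [] => none
  | jt :: es =>
    if pvFnd l jt.2 = -1 then pvPick l es
    else match pvPick l es with
      | none => some (pvFnd l jt.2, jt.1, jt.2)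
      | some q => if pvFnd l jt.2 ≤ q.1 then some (pvFnd l jt.2, jt.1, jt.2) else some q

def pvMerge (a r : Option (Int × Int × String)) : Option (Int × Int × String) :=
  match a, r with
  | none, r => r
  | some q, none => some q
  | some q, some q' => if q'.1 < q.1 then some q' else some q

lemma pvMerge_none (r : Option (Int × Int × String)) : pvMerge none r = r := by
  cases r <;> rfl

lemma pvFold_eq_merge_pick (l : List Char) (es : List (Int × String)) :
    ∀ acc, es.foldl (pvBstep l) acc = pvMerge acc (pvPick l es) := by
  induction es with
  | nil => intro acc; cases acc <;> rfl
  | cons jt es ih =>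
    intro acc
    rw [List.foldl_cons, ih]
    cases acc with
    | none =>
      by_cases hp : pvFnd l jt.2 = -1
      · simp only [pvBstep, pvPick, pvFnd] at hp ⊢
        simp [hp]
      · cases hq : pvPick l es with
        | none =>
          simp only [pvBstep, pvPick, pvFnd] at hp hq ⊢
          simp [hp, hq, pvMerge]
        | some q =>
          simp only [pvBstep, pvPick, pvFnd] at hp hq ⊢
          simp only [hp, if_false, hq, pvMerge]
          split_ifs <;> (try dsimp only) <;> (try split_ifs) <;> first | rfl | (exfalso; omega)
    | some a =>
      by_cases hp : pvFnd l jt.2 = -1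
      · simp only [pvBstep, pvPick, pvFnd] at hp ⊢
        simp [hp, pvMerge]
      · cases hq : pvPick l es with
        | none =>
          simp only [pvBstep, pvPick, pvFnd] at hp hq ⊢
          simp only [hp, if_false, hq, pvMerge]
          split_ifs <;> (try dsimp only) <;> (try split_ifs) <;> first | rfl | (exfalso; omega)
        | some q =>
          simp only [pvBstep, pvPick, pvFnd] at hp hq ⊢
          simp only [hp, if_false, hq, pvMerge]
          split_ifs <;> (try dsimp only) <;> (try split_ifs) <;> first | rfl | (exfalso; omega)

lemma pvPick_none_iff (l : List Char) (es : List (Int × String)) :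
    pvPick l es = none ↔ ∀ jt ∈ es, pvFnd l jt.2 = -1 := by
  induction es with
  | nil => simp [pvPick]
  | cons jt es ih =>
    by_cases hp : pvFnd l jt.2 = -1
    · simp [pvPick, hp, ih]
    · cases hq : pvPick l es <;> simp [pvPick, hp, hq] <;> (try split_ifs) <;> simp_all

lemma pvPick_some (l : List Char) (es : List (Int × String)) (p j : Int) (t : String)
    (h : pvPick l es = some (p, j, t)) :
    ∃ es₁ es₂, es = es₁ ++ (j, t) :: es₂ ∧ pvFnd l t = p ∧ p ≠ -1 ∧
      (∀ jt ∈ es₁, pvFnd l jt.2 = -1 ∨ p < pvFnd l jt.2) ∧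
      (∀ jt ∈ es₂, pvFnd l jt.2 = -1 ∨ p ≤ pvFnd l jt.2) := by
  induction es generalizing p j t with
  | nil => simp [pvPick] at h
  | cons jt es ih =>
    by_cases hp : pvFnd l jt.2 = -1
    · simp only [pvPick, hp, if_true] at h
      obtain ⟨es₁, es₂, hdec, hf, hne, h1, h2⟩ := ih p j t h
      refine ⟨jt :: es₁, es₂, by simp [hdec], hf, hne, ?_, h2⟩
      intro x hx
      rcases List.mem_cons.mp hx with rfl | hx
      · exact Or.inl hp
      · exact h1 x hx
    · cases hq : pvPick l es with
      | none =>
        simp only [pvPick, hp, if_false, hq] at h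
        simp only [Option.some.injEq, Prod.mk.injEq] at h
        obtain ⟨h1, h2, h3⟩ := h
        subst h1; subst h2; subst h3
        refine ⟨[], es, by simp, rfl, hp, by simp, ?_⟩
        intro x hx
        exact Or.inl ((pvPick_none_iff l es).mp hq x hx)
      | some q =>
        obtain ⟨q1, q2, q3⟩ := q
        simp only [pvPick, hp, if_false, hq] at h
        by_cases hle : pvFnd l jt.2 ≤ q1
        · rw [if_pos hle] at h
          simp only [Option.some.injEq, Prod.mk.injEq] at h
          obtain ⟨h1, h2, h3⟩ := h
          subst h1; subst h2; subst h3
          obtain ⟨es₁, es₂, hdec, hf, hne, h1, h2⟩ := ih q1 q2 q3 hq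
          refine ⟨[], es, by simp, rfl, hp, by simp, ?_⟩
          intro x hx
          rw [hdec] at hx
          rcases List.mem_append.mp hx with hx1 | hx1
          · rcases h1 x hx1 with h' | h'
            · exact Or.inl h'
            · exact Or.inr (by omega)
          · rcases List.mem_cons.mp hx1 with rfl | hx2
            · right; simp only; omega
            · rcases h2 x hx2 with h' | h'
              · exact Or.inl h'
              · exact Or.inr (by omega)
        · rw [if_neg hle] at h
          simp only [Option.some.injEq, Prod.mk.injEq] at h
          obtain ⟨h1, h2, h3⟩ := h
          subst h1; subst h2; subst h3
          obtain ⟨es₁, es₂, hdec, hf, hne, h1, h2⟩ := ih q1 q2 q3 hq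
          refine ⟨jt :: es₁, es₂, by simp [hdec], hf, hne, ?_, h2⟩
          intro x hx
          rcases List.mem_cons.mp hx with rfl | hx
          · right; omega
          · exact h1 x hx

-- slice equality in A's test ↔ title is a prefix of the body suffix
lemma pvSlice_match_iff (l : List Char) (t : String) (i : Nat) :
    (t.toList = PySem.List.slice l (some (i : Int)) (some ((i : Int) + (t.toList.length : Int)))) ↔
      t.toList <+: l.drop i := by
  rw [PySem.List.slice_natCast_add, ← List.prefix_iff_eq_take]

lemma pvAinner_none_iff (l : List Char) (i : Nat) (ts : List String) :
    pvAinner l i ts = none ↔ ∀ t ∈ ts, ¬ t.toList <+: l.drop i := by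
  induction ts with
  | nil => simp [pvAinner]
  | cons t ts ih =>
    by_cases h : t.toList <+: l.drop i
    · rw [pvAinner, if_pos ((pvSlice_match_iff l t i).mpr h)]
      simp [h]
    · rw [pvAinner, if_neg (fun hc => h ((pvSlice_match_iff l t i).mp hc))]
      simp [ih, h]

lemma pvAinner_skip (l : List Char) (i : Nat) (ts₁ rest : List String)
    (h : ∀ t ∈ ts₁, ¬ t.toList <+: l.drop i) :
    pvAinner l i (ts₁ ++ rest) = pvAinner l i rest := by
  induction ts₁ with
  | nil => rfl
  | cons t ts ih =>
    rw [List.cons_append, pvAinner,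
      if_neg (fun hc => h t (List.mem_cons_self ..) ((pvSlice_match_iff l t i).mp hc))]
    exact ih (fun x hx => h x (List.mem_cons_of_mem _ hx))

lemma pvAgo_none (tList : List String) (l : List Char) :
    ∀ fuel i, (∀ i', i ≤ i' → i' < i + fuel → pvAinner l i' tList = none) →
      pvAgo tList l i fuel = none := by
  intro fuel
  induction fuel with
  | zero => intro i _; rfl
  | succ fuel ih =>
    intro i h
    rw [pvAgo, h i le_rfl (by omega)]
    exact ih (i + 1) (fun i' h1 h2 => h i' (by omega) (by omega))

lemma pvAgo_reach (tList : List String) (l : List Char) (N : Nat)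
    (hN : pvAinner l N tList ≠ none) :
    ∀ fuel i, i ≤ N → N < i + fuel → (∀ i', i ≤ i' → i' < N → pvAinner l i' tList = none) →
      pvAgo tList l i fuel = pvAinner l N tList := by
  intro fuel
  induction fuel with
  | zero => intro i h1 h2 _; omega
  | succ fuel ih =>
    intro i h1 h2 h3
    by_cases hi : i = N
    · subst hi
      rw [pvAgo]
      cases hc : pvAinner l i tList with
      | none => exact absurd hc hN
      | some r => rfl
    · rw [pvAgo, h3 i le_rfl (by omega)]
      exact ih (i + 1) (by omega) (by omega) (fun i' ha hb => h3 i' (by omega) hb)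

lemma pvFnd_le_of_prefix (l : List Char) (t : String) (i : Nat) (h : t.toList <+: l.drop i) :
    0 ≤ pvFnd l t ∧ pvFnd l t ≤ (i : Int) := by
  have hinf : t.toList <:+: l := h.isInfix.trans (l.drop_suffix i).isInfix
  have h0 : 0 ≤ pvFnd l t := (PySem.Chars.find_nonneg_iff l t.toList).mpr hinf
  refine ⟨h0, ?_⟩
  have hEq : pvFnd l t = PySem.Chars.find l t.toList := rfl
  have hspec := PySem.Chars.find_spec (s := l) (sub := t.toList) h0
  by_contra hlt
  exact hspec.2 i (by omega) h

lemma pvSlice_to_end (l : List Char) (a : Int) (ha : 0 ≤ a) :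
    PySem.List.slice l (some a) (some (l.length : Int)) = PySem.List.slice l (some a) none := by
  rw [PySem.List.slice_toNat _ ha (Int.natCast_nonneg _), PySem.List.slice_from _ ha]
  simp

-- ===== VERDICT (by name: the statement is the Claim_ definition above) =====
theorem removeTitleFromBody_spec : Claim_equal_removeTitleFromBody := by
  intro tList b _hDom hPre
  unfold Spec_removeTitleFromBody removeTitleFromBody removeTitleFromBody_alt
  rw [pvFold_eq_merge_pick, pvMerge_none]
  cases hpick : pvPick b.toList (PySem.List.enumerate tList 0) with
  | none =>
    have hall := (pvPick_none_iff _ _).mp hpick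
    rw [pvAgo_none]
    intro i' _ _
    rw [pvAinner_none_iff]
    intro t ht hpre
    rw [← PySem.List.map_snd_enumerate tList 0] at ht
    obtain ⟨jt, hjt, rfl⟩ := List.mem_map.mp ht
    have hle := pvFnd_le_of_prefix b.toList jt.2 i' hpre
    have hm1 := hall jt hjt
    omega
  | some pjt =>
    obtain ⟨p, j, t⟩ := pjt
    obtain ⟨es₁, es₂, hdec, hf, hne, h1, h2⟩ := pvPick_some _ _ p j t hpick
    have hmin : ∀ jt ∈ PySem.List.enumerate tList 0,
        pvFnd b.toList jt.2 = -1 ∨ p ≤ pvFnd b.toList jt.2 := by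
      intro x hx
      rw [hdec] at hx
      rcases List.mem_append.mp hx with hx' | hx'
      · rcases h1 x hx' with h' | h'
        · exact Or.inl h'
        · exact Or.inr (le_of_lt h')
      · rcases List.mem_cons.mp hx' with rfl | hx''
        · exact Or.inr (le_of_eq hf.symm)
        · exact h2 x hx''
    have h0 : 0 ≤ p := by
      have hge : -1 ≤ PySem.Chars.find b.toList t.toList := PySem.Chars.neg_one_le_find b.toList t.toList
      have : pvFnd b.toList t = PySem.Chars.find b.toList t.toList := rfl
      omega
    set N := p.toNat with hNdef
    have hpN : p = (N : Int) := (Int.toNat_of_nonneg h0).symm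
    have h0' : 0 ≤ PySem.Chars.find b.toList t.toList := by
      have : pvFnd b.toList t = PySem.Chars.find b.toList t.toList := rfl
      omega
    have hprefN : t.toList <+: b.toList.drop N := by
      have hsp := (PySem.Chars.find_spec (s := b.toList) (sub := t.toList) h0').1
      have he : PySem.Chars.find b.toList t.toList = p := hf
      rw [he] at hsp
      exact hsp
    have htmem : t ∈ tList := by
      rw [← PySem.List.map_snd_enumerate tList 0, hdec]
      simp
    have hNlt : N < b.toList.length := by
      cases ht0 : t.toList with
      | nil =>
        have ht'' : t = "" := String.toList_eq_nil_iff.mp ht0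
        have hbne : b ≠ "" := fun hb => hPre ⟨hb, ht'' ▸ htmem⟩
        have hbl : b.toList ≠ [] := fun hb => hbne (String.toList_eq_nil_iff.mp hb)
        have hlen : 0 < b.toList.length := List.length_pos_iff.mpr hbl
        have hfind0 : PySem.Chars.find b.toList t.toList = 0 := by
          rw [ht0]; exact PySem.Chars.find_nil _
        have he : PySem.Chars.find b.toList t.toList = p := hf
        omega
      | cons c cs =>
        have hlen := hprefN.length_le
        rw [List.length_drop, ht0] at hlen
        simp only [List.length_cons] at hlen
        omega
    have htdec : tList = es₁.map (·.2) ++ t :: es₂.map (·.2) := by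
      rw [← PySem.List.map_snd_enumerate tList 0, hdec]
      simp
    have hskip : ∀ t' ∈ es₁.map (·.2), ¬ t'.toList <+: b.toList.drop N := by
      intro t' ht' hpre
      obtain ⟨x, hx, rfl⟩ := List.mem_map.mp ht'
      have hle := pvFnd_le_of_prefix b.toList x.2 N hpre
      rcases h1 x hx with h' | h' <;> omega
    have hinnerN : pvAinner b.toList N tList =
        some (String.ofList (PySem.List.slice b.toList (some (0 : Int)) (some (N : Int)) ++
          List.replicate t.toList.length '_' ++
          PySem.List.slice b.toList (some ((N : Int) + 1 + (t.toList.length : Int)))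
            (some (b.toList.length : Int)))) := by
      rw [htdec, pvAinner_skip _ _ _ _ hskip, pvAinner,
        if_pos ((pvSlice_match_iff b.toList t N).mpr hprefN)]
    rw [pvAgo_reach tList b.toList N (by rw [hinnerN]; simp) b.toList.length 0 (by omega)
      (by omega)
      (by
        intro i' _ hi'
        rw [pvAinner_none_iff]
        intro t' ht' hpre
        rw [← PySem.List.map_snd_enumerate tList 0] at ht'
        obtain ⟨x, hx, rfl⟩ := List.mem_map.mp ht'
        have hle := pvFnd_le_of_prefix b.toList x.2 i' hpre
        rcases hmin x hx with h' | h' <;> omega)]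
    rw [hinnerN, hpN]
    congr 1
    rw [PySem.List.slice_zero_start]
    congr 2
    exact pvSlice_to_end b.toList ((N : Int) + 1 + (t.toList.length : Int)) (by omega)
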